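-- pv_equiv track=rewrite | github.com/JacobZigby/Sudoku_Solver | Data_Gathering/gather.py | remove_dup_hash
-- ===== SOURCE A (Python) =====
-- def remove_dup_hash(hash_list: list):
--     #create an empty dict
--     temp_dict = {}
--     #create list to return indexes to remove
--     to_remove = []
--
--     #go through the list
--     for i in range(len(hash_list)):
--         #doing some dictionary magic here
--         if hash_list[i] not in temp_dict.keys():
--             temp_dict[hash_list[i]] = 1
--         #if not found, add current index to list
--         else:
--             to_remove.append(i)
--
--     #return list of indexs to remove
--     return to_remove
-- ===== SOURCE B (Python) =====
-- def remove_dup_hash(hash_list: list):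
--     # group-then-emit: build value -> list of indices, then keep every index
--     # except the first of each group, and sort back into ascending order
--     groups = {}
--     for i, h in enumerate(hash_list):
--         groups.setdefault(h, []).append(i)
--     dups = []
--     for indices in groups.values():
--         dups.extend(indices[1:])
--     return sorted(dups)
-- ===== Notes on version B (the rewrite author's own statement) =====
-- stated objective: alternative
-- what changed: replaces the single-pass seen-dict scan by a group-then-emit decomposition: one pass builds a value->indices table, a second pass over the groups emits every index but the first of each group, then sorts
import Mathlib
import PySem

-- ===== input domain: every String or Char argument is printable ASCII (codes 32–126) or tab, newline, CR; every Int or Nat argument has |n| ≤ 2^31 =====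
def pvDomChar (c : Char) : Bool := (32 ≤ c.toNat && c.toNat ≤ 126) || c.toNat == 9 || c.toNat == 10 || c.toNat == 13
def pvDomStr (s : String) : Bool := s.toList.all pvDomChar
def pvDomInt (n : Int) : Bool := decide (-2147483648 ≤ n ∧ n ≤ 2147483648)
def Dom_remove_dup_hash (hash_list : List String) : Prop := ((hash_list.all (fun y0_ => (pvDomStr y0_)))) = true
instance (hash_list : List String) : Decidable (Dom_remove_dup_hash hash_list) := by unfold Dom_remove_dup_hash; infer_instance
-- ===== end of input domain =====

-- B replaces A's single-pass seen-dict scan by a group-then-emit decomposition (build a value→indices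
-- table in one pass, emit every index but the first of each group, sort); objective: alternative.

-- ===== PORT A =====
-- temp_dict = {}; to_remove = []; for i in range(len(hash_list)):
--   if hash_list[i] not in temp_dict.keys(): temp_dict[hash_list[i]] = 1 else: to_remove.append(i)
def remove_dup_hash (hash_list : List String) : List Int :=
  (List.foldl
    (fun (st : PySem.Dict String Int × List Int) i =>
      if (st.1.contains (PySem.List.pyGetD hash_list i "")) = false then
        (st.1.insert (PySem.List.pyGetD hash_list i "") 1, st.2)
      else
        (st.1, st.2 ++ [i]))
    (PySem.Dict.empty, [])
    (PySem.List.pyRange 0 (PySem.List.len hash_list) 1)).2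

-- ===== PORT B =====
-- groups = {}; for i, h in enumerate(hash_list): groups.setdefault(h, []).append(i)
-- dups = []; for indices in groups.values(): dups.extend(indices[1:]); return sorted(dups)
def remove_dup_hash_alt (hash_list : List String) : List Int :=
  let groups := List.foldl
    (fun (g : PySem.Dict String (List Int)) p => g.modify p.2 [] (fun l => l ++ [p.1]))
    PySem.Dict.empty (PySem.List.enumerate hash_list 0)
  let dups := List.foldl
    (fun (acc : List Int) idxs => acc ++ PySem.List.slice idxs (some 1) none)
    [] groups.values
  PySem.List.sorted dups (fun x => x)

-- ===== PRECONDITION & SPEC =====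
def Spec_remove_dup_hash (hash_list : List String) (out : List Int) : Prop := out = remove_dup_hash_alt hash_list
instance (hash_list : List String) (out : List Int) : Decidable (Spec_remove_dup_hash hash_list out) := by unfold Spec_remove_dup_hash; infer_instance

-- ===== CLAIM (what is proved, stated in full; the proofs are below) =====
def Claim_equal_remove_dup_hash : Prop := ∀ (hash_list : List String), Dom_remove_dup_hash hash_list → Spec_remove_dup_hash hash_list (remove_dup_hash hash_list)

-- ===== LEMMAS AND PROOFS =====

-- canonical description of A's output: indices (from s) of elements already seen
def fSpec : List String → Int → List String → List Int
  | [], _, _ => []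
  | h :: t, s, seen =>
    if h ∈ seen then s :: fSpec t (s + 1) seen else fSpec t (s + 1) (seen ++ [h])

theorem fSpec_lb (xs : List String) : ∀ (s : Int) (seen : List String) (i : Int),
    i ∈ fSpec xs s seen → s ≤ i := by
  induction xs with
  | nil => intro s seen i h; simp [fSpec] at h
  | cons hd t ih =>
    intro s seen i h
    simp only [fSpec] at h
    split at h
    · rcases List.mem_cons.1 h with rfl | h2
      · exact le_refl i
      · have := ih (s + 1) seen i h2; omega
    · have := ih (s + 1) (seen ++ [hd]) i h; omega

theorem fSpec_pairwise (xs : List String) : ∀ (s : Int) (seen : List String),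
    (fSpec xs s seen).Pairwise (· < ·) := by
  induction xs with
  | nil => intro s seen; simp [fSpec]
  | cons hd t ih =>
    intro s seen
    simp only [fSpec]
    split
    · refine List.pairwise_cons.2 ⟨?_, ih (s + 1) seen⟩
      intro y hy
      have := fSpec_lb t (s + 1) seen y hy; omega
    · exact ih (s + 1) (seen ++ [hd])

theorem fSpec_mem (xs : List String) : ∀ (s : Int) (seen : List String) (i : Int),
    i ∈ fSpec xs s seen ↔
      ∃ (k : Nat), ∃ (hk : k < xs.length), i = s + (k : Int) ∧ xs[k] ∈ seen ++ xs.take k := by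
  induction xs with
  | nil => intro s seen i; simp [fSpec]
  | cons hd t ih =>
    intro s seen i
    simp only [fSpec]
    by_cases hmem : hd ∈ seen
    · rw [if_pos hmem]
      constructor
      · intro h
        rcases List.mem_cons.1 h with rfl | h
        · exact ⟨0, by simp, by simp, by simpa using hmem⟩
        · rcases (ih (s + 1) seen i).1 h with ⟨k, hk, hi, hin⟩
          have hklen : k + 1 < (hd :: t).length := by simp only [List.length_cons]; omega
          have hieq : i = s + ((k + 1 : Nat) : Int) := by push_cast at hi ⊢; omega
          refine ⟨k + 1, hklen, hieq, ?_⟩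
          simp only [List.take_succ_cons, List.getElem_cons_succ]
          simp only [List.mem_append] at hin ⊢
          rcases hin with h' | h'
          · exact Or.inl h'
          · exact Or.inr (List.mem_cons_of_mem _ h')
      · rintro ⟨k, hk, hi, hin⟩
        cases k with
        | zero =>
          have : i = s := by push_cast at hi; omega
          subst this
          exact List.mem_cons_self ..
        | succ k' =>
          apply List.mem_cons_of_mem
          have hklen : k' < t.length := by simp only [List.length_cons] at hk; omega
          have hieq : i = (s + 1) + (k' : Int) := by push_cast at hi ⊢; omega
          refine (ih (s + 1) seen i).2 ⟨k', hklen, hieq, ?_⟩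
          simp only [List.take_succ_cons, List.getElem_cons_succ, List.mem_append,
            List.mem_cons] at hin ⊢
          rcases hin with h' | (h' | h')
          · exact Or.inl h'
          · exact Or.inl (h' ▸ hmem)
          · exact Or.inr h'
    · rw [if_neg hmem]
      rw [ih (s + 1) (seen ++ [hd]) i]
      constructor
      · rintro ⟨k, hk, hi, hin⟩
        have hklen : k + 1 < (hd :: t).length := by simp only [List.length_cons]; omega
        have hieq : i = s + ((k + 1 : Nat) : Int) := by push_cast at hi ⊢; omega
        refine ⟨k + 1, hklen, hieq, ?_⟩
        simp only [List.take_succ_cons, List.getElem_cons_succ, List.mem_append,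
          List.mem_cons] at hin ⊢
        tauto
      · rintro ⟨k, hk, hi, hin⟩
        cases k with
        | zero =>
          simp only [List.take_zero, List.append_nil, List.getElem_cons_zero] at hin
          exact absurd hin hmem
        | succ k' =>
          have hklen : k' < t.length := by simp only [List.length_cons] at hk; omega
          have hieq : i = (s + 1) + (k' : Int) := by push_cast at hi ⊢; omega
          refine ⟨k', hklen, hieq, ?_⟩
          simp only [List.take_succ_cons, List.getElem_cons_succ, List.mem_append,
            List.mem_cons] at hin ⊢
          tauto

-- A's loop, folded over enumerate, computes fSpec
theorem A_fold (ys : List String) : ∀ (s : Int) (d : PySem.Dict String Int) (acc : List Int)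
    (seen : List String), (∀ v, d.contains v = decide (v ∈ seen)) →
    (List.foldl (fun (st : PySem.Dict String Int × List Int) p =>
        if (st.1.contains p.2) = false then (st.1.insert p.2 1, st.2) else (st.1, st.2 ++ [p.1]))
      (d, acc) (PySem.List.enumerate ys s)).2 = acc ++ fSpec ys s seen := by
  induction ys with
  | nil => intro s d acc seen _; simp [PySem.List.enumerate_nil, fSpec]
  | cons h t ih =>
    intro s d acc seen hd
    rw [PySem.List.enumerate_cons, List.foldl_cons]
    by_cases hmem : h ∈ seen
    · have hc : d.contains h = true := by rw [hd]; simpa using hmem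
      have hstep : (if (d, acc).1.contains (s, h).2 = false
            then ((d, acc).1.insert (s, h).2 1, (d, acc).2)
            else ((d, acc).1, (d, acc).2 ++ [(s, h).1])) = (d, acc ++ [s]) := by simp [hc]
      rw [hstep, ih (s + 1) d (acc ++ [s]) seen hd]
      simp [fSpec, hmem]
    · have hc : d.contains h = false := by rw [hd]; simpa using hmem
      have hstep : (if (d, acc).1.contains (s, h).2 = false
            then ((d, acc).1.insert (s, h).2 1, (d, acc).2)
            else ((d, acc).1, (d, acc).2 ++ [(s, h).1])) = (d.insert h 1, acc) := by simp [hc]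
      rw [hstep, ih (s + 1) (d.insert h 1) acc (seen ++ [h]) (fun v => by
        rw [PySem.Dict.contains_insert, hd]
        by_cases hv : v = h <;> simp [hv, List.mem_append])]
      simp [fSpec, hmem]

theorem A_eq_fSpec (xs : List String) : remove_dup_hash xs = fSpec xs 0 [] := by
  have h := A_fold xs 0 PySem.Dict.empty [] []
    (fun v => by simp [PySem.Dict.contains_empty])
  rw [PySem.List.enumerate_eq_map_pyRange xs "", List.foldl_map, List.nil_append] at h
  exact h

-- occurrence indices of value v in xs
def occ (xs : List String) (v : String) : List Int :=
  List.map (fun p => p.1) (List.filter (fun p => p.2 == v) (PySem.List.enumerate xs 0))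

theorem mem_occ (xs : List String) (v : String) (i : Int) :
    i ∈ occ xs v ↔ ∃ (k : Nat), ∃ (hk : k < xs.length), i = (k : Int) ∧ xs[k] = v := by
  unfold occ
  simp only [List.mem_map, List.mem_filter, PySem.List.mem_enumerate_iff]
  constructor
  · rintro ⟨p, ⟨⟨k, hk, rfl⟩, hv⟩, rfl⟩
    exact ⟨k, hk, by omega, by simpa using hv⟩
  · rintro ⟨k, hk, rfl, hv⟩
    exact ⟨((0 : Int) + (k : Int), xs[k]), ⟨⟨k, hk, rfl⟩, by simpa using hv⟩, by omega⟩

theorem occ_pairwise (xs : List String) (v : String) : (occ xs v).Pairwise (· < ·) := by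
  unfold occ
  refine List.Pairwise.map _ (fun a b h => h) ?_
  exact (PySem.List.pairwise_lt_enumerate xs 0).sublist List.filter_sublist

-- the multiset B emits, before sorting
def dupsOf (xs : List String) : List Int :=
  ((PySem.Set.ofList xs).map (fun v => (occ xs v).tail)).flatten

-- B's grouping dict (defeq to the 'groups' local of the port)
def Bgroups (xs : List String) : PySem.Dict String (List Int) :=
  List.foldl
    (fun (g : PySem.Dict String (List Int)) p => g.modify p.2 [] (fun l => l ++ [p.1]))
    PySem.Dict.empty (PySem.List.enumerate xs 0)

theorem Bgroups_eq (xs : List String) : Bgroups xs =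
    List.foldl (fun (d : PySem.Dict String (List Int)) p => d.modify p.1 [] (fun l => l ++ [p.2]))
      PySem.Dict.empty ((PySem.List.enumerate xs 0).map (fun p => (p.2, p.1))) := by
  rw [Bgroups, List.foldl_map]

theorem Bgroups_keys (xs : List String) : (Bgroups xs).keys = PySem.Set.ofList xs := by
  rw [Bgroups_eq]
  refine (PySem.Dict.keys_foldl_modify_key _ (fun p : String × Int => p.1) []
    (fun _ p => (fun l => l ++ [p.2])) PySem.Dict.empty).trans ?_
  rw [PySem.Dict.keys_empty, PySem.Set.update_nil_left, List.map_map]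
  have : ((fun p : String × Int => p.1) ∘ (fun p : Int × String => (p.2, p.1)))
      = (fun p : Int × String => p.2) := rfl
  rw [this, PySem.List.map_snd_enumerate]

theorem Bgroups_nodup_keys (xs : List String) : (Bgroups xs).keys.Nodup := by
  rw [Bgroups_eq]
  exact PySem.Dict.nodup_keys_foldl_modify_key _ (fun p : String × Int => p.1) []
    (fun _ p => (fun l => l ++ [p.2])) PySem.Dict.empty PySem.Dict.nodup_keys_empty

theorem Bgroups_getD (xs : List String) (v : String) :
    (Bgroups xs).getD v [] = occ xs v := by
  rw [Bgroups_eq, PySem.Dict.getD_foldl_modify_append, PySem.Dict.getD_empty]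
  rw [List.nil_append, List.filter_map, List.map_map]
  rfl

theorem Bgroups_values (xs : List String) :
    (Bgroups xs).values = (PySem.Set.ofList xs).map (fun v => occ xs v) := by
  rw [PySem.Dict.values_eq_map_keys (Bgroups xs) (Bgroups_nodup_keys xs) [], Bgroups_keys]
  exact List.map_congr_left (fun v _ => Bgroups_getD xs v)

theorem B_eq_sorted (xs : List String) :
    remove_dup_hash_alt xs = PySem.List.sorted (dupsOf xs) (fun x => x) := by
  have h1 : remove_dup_hash_alt xs = PySem.List.sorted
      (List.foldl (fun (acc : List Int) idxs => acc ++ PySem.List.slice idxs (some 1) none) []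
        (Bgroups xs).values) (fun x => x) := rfl
  rw [h1, Bgroups_values]
  simp only [PySem.List.slice_from_one]
  rw [PySem.List.foldl_append_eq_flatMap, List.nil_append, List.flatMap_def, List.map_map]
  rfl

theorem mem_tail_of_pairwise {l : List Int} (h : l.Pairwise (· < ·)) (x : Int) :
    x ∈ l.tail ↔ x ∈ l ∧ ∃ y ∈ l, y < x := by
  cases l with
  | nil => simp
  | cons a t =>
    rw [List.pairwise_cons] at h
    simp only [List.tail_cons, List.mem_cons]
    constructor
    · intro hx
      exact ⟨Or.inr hx, a, Or.inl rfl, h.1 x hx⟩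
    · rintro ⟨hx, y, hy, hlt⟩
      rcases hx with rfl | hx
      · rcases hy with rfl | hy
        · exact absurd hlt (lt_irrefl _)
        · exact absurd hlt (not_lt.2 (h.1 y hy).le)
      · exact hx

theorem mem_dupsOf (xs : List String) (i : Int) :
    i ∈ dupsOf xs ↔ i ∈ fSpec xs 0 [] := by
  rw [fSpec_mem]
  unfold dupsOf
  simp only [List.mem_flatten, List.mem_map]
  constructor
  · rintro ⟨l, ⟨v, hv, rfl⟩, hi⟩
    rw [mem_tail_of_pairwise (occ_pairwise xs v)] at hi
    rcases hi with ⟨hi, y, hy, hlt⟩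
    rcases (mem_occ xs v i).1 hi with ⟨k, hk, rfl, hkv⟩
    rcases (mem_occ xs v y).1 hy with ⟨j, hj, rfl, hjv⟩
    have hjk : j < k := by exact_mod_cast hlt
    refine ⟨k, hk, by omega, ?_⟩
    rw [List.nil_append, hkv, ← hjv]
    exact List.mem_take_iff_getElem.2 ⟨j, by omega, rfl⟩
  · rintro ⟨k, hk, hik, hkmem⟩
    rw [List.nil_append] at hkmem
    subst hik
    rcases List.mem_take_iff_getElem.1 hkmem with ⟨j, hj, hjv⟩
    have hjk : j < k := by omega
    have hjlen : j < xs.length := by omega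
    refine ⟨(occ xs (xs[k])).tail, ⟨xs[k], (PySem.Set.mem_ofList xs _).2 (List.getElem_mem hk), rfl⟩, ?_⟩
    rw [mem_tail_of_pairwise (occ_pairwise xs _)]
    refine ⟨(mem_occ xs _ _).2 ⟨k, hk, by omega, rfl⟩, (j : Int),
      (mem_occ xs _ _).2 ⟨j, hjlen, rfl, hjv⟩, by omega⟩

theorem nodup_fSpec (xs : List String) : (fSpec xs 0 []).Nodup :=
  (fSpec_pairwise xs 0 []).imp (fun h => ne_of_lt h)

theorem nodup_dupsOf (xs : List String) : (dupsOf xs).Nodup := by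
  unfold dupsOf
  rw [List.nodup_flatten]
  constructor
  · intro l hl
    rcases List.mem_map.1 hl with ⟨v, hv, rfl⟩
    exact ((occ_pairwise xs v).sublist (List.tail_sublist _)).imp (fun h => ne_of_lt h)
  · refine List.Pairwise.map _ ?_ (PySem.Set.nodup_ofList xs)
    intro v w hvw i hi hi'
    rw [mem_tail_of_pairwise (occ_pairwise xs v)] at hi
    rw [mem_tail_of_pairwise (occ_pairwise xs w)] at hi'
    rcases (mem_occ xs v i).1 hi.1 with ⟨k, hk, rfl, hkv⟩
    rcases (mem_occ xs w _).1 hi'.1 with ⟨k', hk', hkk, hkw⟩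
    have hk2 : k = k' := by exact_mod_cast hkk
    subst hk2
    exact hvw (hkv.symm.trans hkw)

-- ===== VERDICT (by name: the statement is the Claim_ definition above) =====
theorem remove_dup_hash_spec : Claim_equal_remove_dup_hash := by
  intro xs _
  unfold Spec_remove_dup_hash
  rw [A_eq_fSpec, B_eq_sorted]
  refine (PySem.List.sorted_eq_of_perm_of_pairwise_lt (dupsOf xs) (fSpec xs 0 [])
    (fun x => x) ?_ (fSpec_pairwise xs 0 [])).symm
  rw [List.perm_ext_iff_of_nodup (nodup_fSpec xs) (nodup_dupsOf xs)]
  intro a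
  rw [mem_dupsOf]
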